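-- pv_equiv track=rewrite | github.com/maximinus/HandyAI | examples/talker.py | merge_short_strings
-- ===== SOURCE A (Python) =====
-- MIN_SPOKEN_LENGTH = 20
--
-- def merge_short_strings(strings):
--     merged = []
--     i = 0
--     while i < len(strings):
--         current_string = strings[i]
--         # Keep appending the next string until current_string is long enough
--         while len(current_string) < MIN_SPOKEN_LENGTH and i + 1 < len(strings):
--             i += 1
--             current_string += strings[i]
--         merged.append(current_string)
--         i += 1
--     return merged
-- ===== SOURCE B (Python) =====
-- MIN_SPOKEN_LENGTH = 20
--
-- def merge_short_strings(strings):
--     merged = []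
--     current = None
--     for s in strings:
--         if current is None:
--             current = s
--         elif len(current) < MIN_SPOKEN_LENGTH:
--             current += s
--         else:
--             merged.append(current)
--             current = s
--     if current is not None:
--         merged.append(current)
--     return merged
-- ===== Notes on version B (the rewrite author's own statement) =====
-- stated objective: simpler
-- what changed: Replaced the nested index-based while loops with a single forward for-loop over the strings keeping a running current-chunk accumulator (None sentinel) that is flushed once it reaches the minimum length, plus a final flush.
import Mathlib
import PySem

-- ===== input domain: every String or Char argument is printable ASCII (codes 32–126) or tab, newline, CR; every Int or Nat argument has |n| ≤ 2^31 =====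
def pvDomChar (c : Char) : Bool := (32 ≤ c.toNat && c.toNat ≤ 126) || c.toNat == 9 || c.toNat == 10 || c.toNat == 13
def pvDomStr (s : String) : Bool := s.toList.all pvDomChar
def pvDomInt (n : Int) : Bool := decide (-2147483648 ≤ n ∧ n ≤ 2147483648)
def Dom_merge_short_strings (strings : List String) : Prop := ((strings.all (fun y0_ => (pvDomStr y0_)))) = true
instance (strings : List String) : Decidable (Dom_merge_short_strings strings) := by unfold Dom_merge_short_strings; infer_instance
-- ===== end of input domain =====

-- B is a simpler single-pass rewrite of A (running accumulator instead of nested index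
-- loops); same return value, no speed claim.

-- ===== PORT A =====
-- inner while loop of A: keep appending the next string while current is short
def innerA (strings : List String) (cur : String) (i : Nat) : String × Nat :=
  if cur.length < 20 ∧ i + 1 < strings.length then
    innerA strings (cur ++ strings.getD (i+1) "") (i+1)
  else (cur, i)
termination_by strings.length - i
decreasing_by omega

theorem innerA_ge (strings : List String) (cur : String) (i : Nat) :
    i ≤ (innerA strings cur i).2 := by
  unfold innerA
  split
  · exact Nat.le_trans (Nat.le_succ i) (innerA_ge strings _ (i+1))
  · exact Nat.le_refl i
termination_by strings.length - i
decreasing_by next h => omega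

-- outer while loop of A
def outerA (strings : List String) (merged : List String) (i : Nat) : List String :=
  if h : i < strings.length then
    let p := innerA strings (strings.getD i "") i
    outerA strings (merged ++ [p.1]) (p.2 + 1)
  else merged
termination_by strings.length - i
decreasing_by
  have := innerA_ge strings (strings.getD i "") i
  omega

def merge_short_strings (strings : List String) : List String :=
  outerA strings [] 0

-- ===== PORT B =====
-- one step of B's for-loop: state is (merged so far, optional current chunk)
def altStep (st : List String × Option String) (s : String) : List String × Option String :=
  match st.2 with
  | none => (st.1, some s)
  | some c => if c.length < 20 then (st.1, some (c ++ s)) else (st.1 ++ [c], some s)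

-- the final flush after B's loop
def altFlush (st : List String × Option String) : List String :=
  match st.2 with
  | none => st.1
  | some c => st.1 ++ [c]

def merge_short_strings_alt (strings : List String) : List String :=
  altFlush (strings.foldl altStep ([], none))

-- ===== PRECONDITION & SPEC =====
def Spec_merge_short_strings (strings : List String) (out : List String) : Prop := out = merge_short_strings_alt strings
instance (strings : List String) (out : List String) : Decidable (Spec_merge_short_strings strings out) := by unfold Spec_merge_short_strings; infer_instance

-- ===== CLAIM (what is proved, stated in full; the proofs are below) =====
def Claim_equal_merge_short_strings : Prop := ∀ (strings : List String), Dom_merge_short_strings strings → Spec_merge_short_strings strings (merge_short_strings strings)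

-- ===== LEMMAS AND PROOFS =====

-- common list-level description of one chunk: absorb strings while cur is short
def chunkInner (cur : String) : List String → String × List String
  | [] => (cur, [])
  | x :: xs => if cur.length < 20 then chunkInner (cur ++ x) xs else (cur, x :: xs)

theorem chunkInner_len (cur : String) (l : List String) :
    (chunkInner cur l).2.length ≤ l.length := by
  induction l generalizing cur with
  | nil => simp [chunkInner]
  | cons x xs ih =>
    simp only [chunkInner]
    split
    · exact Nat.le_trans (ih _) (Nat.le_succ _)
    · exact Nat.le_refl _

-- list-level description of the whole result
def chunkOuter : List String → List String
  | [] => []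
  | x :: xs =>
    (chunkInner x xs).1 :: chunkOuter (chunkInner x xs).2
termination_by l => l.length
decreasing_by
  have := chunkInner_len x xs
  simp only [List.length_cons]
  omega

theorem drop_cons_facts (strings : List String) (i : Nat) (x : String) (xs : List String)
    (h : strings.drop i = x :: xs) :
    strings.getD i "" = x ∧ strings.drop (i+1) = xs ∧ i < strings.length := by
  have hlen : i < strings.length := by
    by_contra hc
    rw [List.drop_eq_nil_of_le (by omega)] at h
    simp at h
  have h0 : strings[i]? = some x := by
    have h1 : (List.drop i strings)[0]? = strings[i+0]? := List.getElem?_drop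
    rw [h] at h1
    simpa using h1.symm
  refine ⟨by simp [List.getD, h0], ?_, hlen⟩
  have h2 : strings.drop (i+1) = (strings.drop i).drop 1 := by
    rw [List.drop_drop]
  simp [h2, h]

theorem innerA_eq (strings : List String) (l : List String) (cur : String) (i : Nat)
    (hd : strings.drop (i+1) = l) (hi : i + 1 ≤ strings.length) :
    innerA strings cur i
      = ((chunkInner cur l).1, strings.length - (chunkInner cur l).2.length - 1)
    ∧ strings.drop (strings.length - (chunkInner cur l).2.length) = (chunkInner cur l).2 := by
  induction l generalizing cur i with
  | nil =>
    have hlen : strings.length ≤ i + 1 := by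
      have := congrArg List.length hd
      simp at this
      omega
    have hin : i + 1 = strings.length := by omega
    rw [innerA, if_neg (by omega)]
    simp [chunkInner, ← hin]
  | cons x xs ih =>
    obtain ⟨hget, hdrop, hlt⟩ := drop_cons_facts strings (i+1) x xs hd
    have hxlen : xs.length + 1 = strings.length - (i+1) := by
      have := congrArg List.length hd
      simp at this
      omega
    rw [innerA]
    simp only [chunkInner]
    by_cases hc : cur.length < 20
    · rw [if_pos ⟨hc, hlt⟩, if_pos hc, hget]
      exact ih (cur ++ x) (i+1) hdrop (by omega)
    · rw [if_neg (by tauto), if_neg hc]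
      constructor
      · have he : strings.length - (xs.length + 1) - 1 = i := by omega
        simp [he]
      · have he : strings.length - (xs.length + 1) = i + 1 := by omega
        simp [he, hd]

theorem outerA_eq (k : Nat) (strings : List String) (merged : List String) (i : Nat)
    (hk : strings.length - i ≤ k) :
    outerA strings merged i = merged ++ chunkOuter (strings.drop i) := by
  induction k generalizing merged i with
  | zero =>
    have : strings.length ≤ i := by omega
    rw [outerA, dif_neg (by omega), List.drop_eq_nil_of_le this]
    simp [chunkOuter]
  | succ k ih =>
    by_cases h : i < strings.length
    · have hne : strings.drop i ≠ [] := by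
        have hp : 0 < (strings.drop i).length := by simp; omega
        exact List.ne_nil_of_length_pos hp
      obtain ⟨x, xs, hcons⟩ := List.exists_cons_of_ne_nil hne
      obtain ⟨hget, hdrop, -⟩ := drop_cons_facts strings i x xs hcons
      obtain ⟨hinner, hrest⟩ := innerA_eq strings xs x i hdrop (by omega)
      have hxslen : xs.length ≤ strings.length - (i+1) := by
        have := congrArg List.length hcons
        simp at this
        omega
      have hclen := chunkInner_len x xs
      rw [outerA, dif_pos h]
      simp only [hget, hinner]
      rw [ih (merged ++ [(chunkInner x xs).1])
            (strings.length - (chunkInner x xs).2.length - 1 + 1) (by omega)]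
      rw [show strings.length - (chunkInner x xs).2.length - 1 + 1
            = strings.length - (chunkInner x xs).2.length by omega]
      rw [hrest, hcons]
      rw [chunkOuter]
      simp
    · rw [outerA, dif_neg h, List.drop_eq_nil_of_le (by omega)]
      simp [chunkOuter]

theorem altLoop (l : List String) (res : List String) (c : String) :
    altFlush (l.foldl altStep (res, some c))
      = res ++ (chunkInner c l).1 :: chunkOuter (chunkInner c l).2 := by
  induction l generalizing res c with
  | nil => simp [altFlush, chunkInner, chunkOuter]
  | cons x xs ih =>
    simp only [List.foldl_cons, altStep, chunkInner]
    by_cases hc : c.length < 20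
    · rw [if_pos hc, if_pos hc]
      exact ih res (c ++ x)
    · rw [if_neg hc, if_neg hc]
      rw [ih (res ++ [c]) x]
      rw [chunkOuter]
      simp

-- ===== VERDICT (by name: the statement is the Claim_ definition above) =====
theorem merge_short_strings_spec : Claim_equal_merge_short_strings := by
  intro strings _
  unfold Spec_merge_short_strings merge_short_strings merge_short_strings_alt
  rw [outerA_eq strings.length strings [] 0 (by omega)]
  cases strings with
  | nil => simp [chunkOuter, altFlush]
  | cons x xs =>
    simp only [List.drop_zero, List.foldl_cons, altStep, List.nil_append]
    rw [altLoop xs [] x, chunkOuter]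
    simp
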